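-- pv_equiv track=rewrite | github.com/myd2002/aifusion-skills | gitea-progress-report/scripts/get_commits.py | is_vague_message
-- ===== SOURCE A (Python) =====
-- VAGUE_KEYWORDS = [
--     "update", "fix", "modify", "change", "edit", "adjust",
--     "修改", "更新", "修复", "调整", "改", "完善", "优化", "test", "测试"
-- ]
--
-- def is_vague_message(message: str) -> bool:
--     msg = message.strip().lower()
--     if len(msg) < 10:
--         return True
--     for keyword in VAGUE_KEYWORDS:
--         if msg in [keyword, keyword + ".", keyword + "s"]:
--             return True
--     return False
-- ===== SOURCE B (Python) =====
-- def is_vague_message(message: str) -> bool: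
--     # Every VAGUE_KEYWORDS entry has at most 6 characters, so even with the
--     # one-character period/plural suffix a matching message has at most 7
--     # characters -- which the `len(msg) < 10` guard already returned True for.
--     # The keyword loop is therefore dead code and the whole check reduces to
--     # the length test (lowercasing does not change the length).
--     return len(message.strip()) < 10
-- ===== Notes on version B (the rewrite author's own statement) =====
-- stated objective: simpler
-- what changed: B drops the keyword-variant loop entirely: every keyword plus its one-character period/plural variant is at most 7 characters, so the loop can never fire once the length-10 guard passes, and the function reduces to testing whether the stripped message is shorter than 10 characters.
import Mathlib
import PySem

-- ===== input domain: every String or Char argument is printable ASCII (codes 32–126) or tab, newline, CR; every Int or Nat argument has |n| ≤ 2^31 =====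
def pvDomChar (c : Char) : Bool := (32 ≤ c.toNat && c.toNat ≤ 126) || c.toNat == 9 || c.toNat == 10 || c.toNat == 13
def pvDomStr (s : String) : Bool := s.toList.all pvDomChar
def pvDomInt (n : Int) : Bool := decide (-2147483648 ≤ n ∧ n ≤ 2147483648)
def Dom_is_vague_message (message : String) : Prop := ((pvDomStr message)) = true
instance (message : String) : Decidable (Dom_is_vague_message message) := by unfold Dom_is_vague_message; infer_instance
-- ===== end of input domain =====

-- B: every keyword variant A tests is at most 7 chars, so the loop is dead code behind the len>=10 guard; B is just the length test (objective: simpler).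

-- ===== PORT A =====
def pvKeywordsA : List (List Char) :=
  ["update", "fix", "modify", "change", "edit", "adjust",
   "修改", "更新", "修复", "调整", "改", "完善", "优化", "test", "测试"].map String.toList

def is_vague_message (message : String) : Bool :=
  let msg := PySem.Chars.lower (PySem.Chars.strip message.toList)
  if msg.length < 10 then true
  else pvKeywordsA.any (fun k => msg == k || msg == k ++ ['.'] || msg == k ++ ['s'])

-- ===== PORT B =====
def is_vague_message_alt (message : String) : Bool :=
  (PySem.Chars.strip message.toList).length < 10

-- ===== PRECONDITION & SPEC =====
def Spec_is_vague_message (message : String) (out : Bool) : Prop := out = is_vague_message_alt message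
instance (message : String) (out : Bool) : Decidable (Spec_is_vague_message message out) := by unfold Spec_is_vague_message; infer_instance

-- ===== CLAIM =====
def Claim_equal_is_vague_message : Prop := ∀ (message : String), Dom_is_vague_message message → Spec_is_vague_message message (is_vague_message message)

-- ===== LEMMAS AND PROOFS =====

theorem pvKeywordsA_short : ∀ k ∈ pvKeywordsA, k.length ≤ 6 := by decide

theorem pvLower_length (l : List Char) : (PySem.Chars.lower l).length = l.length := by
  simp [PySem.Chars.lower]

-- the keyword loop can never succeed on a message of length ≥ 10
theorem pvA_loop_false {msg : List Char} (h : 10 ≤ msg.length) :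
    pvKeywordsA.any (fun k => msg == k || msg == k ++ ['.'] || msg == k ++ ['s']) = false := by
  rw [List.any_eq_false]
  intro k hk
  have hlen := pvKeywordsA_short k hk
  simp only [Bool.or_eq_true, beq_iff_eq, not_or]
  refine ⟨⟨fun he => ?_, fun he => ?_⟩, fun he => ?_⟩ <;>
    (have := congrArg List.length he; simp at this; omega)

-- ===== VERDICT =====
theorem is_vague_message_spec : Claim_equal_is_vague_message := by
  intro message _
  unfold Spec_is_vague_message is_vague_message is_vague_message_alt
  simp only []
  by_cases h : (PySem.Chars.strip message.toList).length < 10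
  · simp [pvLower_length, h]
  · rw [not_lt] at h
    have h' : 10 ≤ (PySem.Chars.lower (PySem.Chars.strip message.toList)).length := by
      rw [pvLower_length]; exact h
    simp [pvLower_length, pvA_loop_false h', Nat.not_lt.mpr h]
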